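-- pv_equiv track=rewrite | github.com/jz-lu/mirrorcodes | progress.py | factor_prime_power
-- ===== SOURCE A (Python) =====
-- from typing import Dict, List, Tuple
--
-- def factor_prime_power(n: int) -> Tuple[int, int]:
--     """Return (p, k) such that n = p**k assuming n is a prime power."""
--     if n < 2:
--         raise ValueError(f"{n} is not a valid prime power >= 2")
--     p = 2
--     while p * p <= n and n % p != 0:
--         p += 1
--     if n % p != 0:
--         p = n
--     k = 0
--     m = n
--     while m % p == 0:
--         m //= p
--         k += 1
--     if m != 1:
--         raise ValueError(f"{n} is not a pure prime power")
--     return p, k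
-- ===== SOURCE B (Python) =====
-- def factor_prime_power(n: int) -> "Tuple[int, int]":
--     """Return (p, k) such that n = p**k assuming n is a prime power."""
--     if n < 2:
--         raise ValueError(f"{n} is not a valid prime power >= 2")
--     m = n
--     factors = []
--     d = 2
--     while d * d <= m:
--         while m % d == 0:
--             m //= d
--             factors.append(d)
--         d += 1
--     if m > 1:
--         factors.append(m)
--     p = factors[0]
--     if any(f != p for f in factors):
--         raise ValueError(f"{n} is not a pure prime power")
--     return p, len(factors)
-- ===== Notes on version B (the rewrite author's own statement) =====
-- stated objective: alternative
-- what changed: Replaces A's two-pass structure (find the smallest prime factor, then count its exponent in a second loop) by a single full trial-division factorization that collects every prime factor in one nested pass and then checks that all collected factors coincide.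
import Mathlib
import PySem

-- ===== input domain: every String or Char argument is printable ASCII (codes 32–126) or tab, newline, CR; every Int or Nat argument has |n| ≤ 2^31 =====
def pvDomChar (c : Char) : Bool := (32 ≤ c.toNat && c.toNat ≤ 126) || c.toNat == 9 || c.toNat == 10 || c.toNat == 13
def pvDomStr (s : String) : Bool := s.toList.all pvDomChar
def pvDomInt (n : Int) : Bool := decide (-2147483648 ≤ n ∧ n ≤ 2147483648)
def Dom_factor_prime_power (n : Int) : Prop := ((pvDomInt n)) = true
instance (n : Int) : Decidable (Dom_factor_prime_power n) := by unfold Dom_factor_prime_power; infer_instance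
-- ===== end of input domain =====

-- B replaces A's two passes (find smallest prime factor, then count its exponent) by one full
-- trial-division factorization followed by an all-factors-equal check; alternative structure, same cost.

-- ===== PORT A =====
-- small termination facts, cited by name in the decreasing_by of the loop ports below
theorem pv_findp_dec (n p : Int) (h : p * p ≤ n) :
    (n + 1 - (p + 1)).toNat < (n + 1 - p).toNat := by
  have h1 := mul_self_nonneg p
  rcases le_or_gt p 0 with hp | hp
  · omega
  · have h2 : p * 1 ≤ p * p := by apply mul_le_mul_of_nonneg_left <;> omega
    omega

theorem pv_floordiv_lt (m d : Int) (hd : 2 ≤ d) (hm : 0 < m) : PySem.Int.floordiv m d < m := by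
  rw [PySem.Int.floordiv_lt_iff_lt_mul (by omega)]
  nlinarith

theorem pv_floordiv_toNat_lt (m d : Int) (hd : 2 ≤ d) (hm : 0 < m) :
    (PySem.Int.floordiv m d).toNat < m.toNat := by
  have h1 := pv_floordiv_lt m d hd hm
  have h2 : 0 ≤ PySem.Int.floordiv m d := by
    rw [PySem.Int.le_floordiv_iff_mul_le (by omega)]; omega
  omega

-- while p * p <= n and n % p != 0: p += 1
def pvFindP (n p : Int) : Int :=
  if h : p * p ≤ n ∧ PySem.Int.mod n p ≠ 0 then pvFindP n (p + 1) else p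
termination_by (n + 1 - p).toNat
decreasing_by exact pv_findp_dec n p h.1

-- while m % p == 0: m //= p; k += 1   (the '2 ≤ p ∧ 0 < m' conjuncts only make the
-- recursion total; every call A makes has p ≥ 2 and m ≥ 2, where they hold)
def pvCountLoop (p k m : Int) : Int × Int :=
  if h : 2 ≤ p ∧ 0 < m ∧ PySem.Int.mod m p = 0 then
    pvCountLoop p (k + 1) (PySem.Int.floordiv m p)
  else (k, m)
termination_by m.toNat
decreasing_by exact pv_floordiv_toNat_lt m p h.1 h.2.1

def factor_prime_power (n : Int) : Int × Int :=
  if n < 2 then (0, 0)  -- raise ValueError (excluded by Pre_)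
  else
    let q := pvFindP n 2
    let p := if PySem.Int.mod n q ≠ 0 then n else q
    let r := pvCountLoop p 0 n
    if r.2 ≠ 1 then (0, 0)  -- raise ValueError (excluded by Pre_)
    else (p, r.1)

-- ===== PORT B =====
-- while m % d == 0: m //= d; factors.append(d)   (the '2 ≤ d ∧ 0 < m' conjuncts only make the
-- recursion total; every call B makes has d ≥ 2 and m ≥ 1, where they hold)
def pvDivOut (d m : Int) (acc : List Int) : List Int × Int :=
  if h : 2 ≤ d ∧ 0 < m ∧ PySem.Int.mod m d = 0 then
    pvDivOut d (PySem.Int.floordiv m d) (acc ++ [d])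
  else (acc, m)
termination_by m.toNat
decreasing_by exact pv_floordiv_toNat_lt m d h.1 h.2.1

-- the remainder never grows (needed for the termination of pvTrial)
theorem pvDivOut_snd_le (d m : Int) (acc : List Int) : (pvDivOut d m acc).2 ≤ m := by
  rw [pvDivOut]
  split_ifs with h
  · exact le_trans (pvDivOut_snd_le d _ _) (le_of_lt (pv_floordiv_lt m d h.1 h.2.1))
  · exact le_rfl
termination_by m.toNat
decreasing_by exact pv_floordiv_toNat_lt m d h.1 h.2.1

theorem pv_trial_dec (d m : Int) (acc : List Int) (hd : 2 ≤ d) (hdm : d * d ≤ m) :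
    ((pvDivOut d m acc).2 + 1 - (d + 1)).toNat < (m + 1 - d).toNat := by
  have h1 := pvDivOut_snd_le d m acc
  have h2 : d * 1 ≤ d * d := by apply mul_le_mul_of_nonneg_left <;> omega
  omega

-- while d * d <= m: (inner loop); d += 1   ('2 ≤ d' only makes the recursion total; B starts at d = 2)
def pvTrial (d m : Int) (acc : List Int) : List Int × Int :=
  if h : 2 ≤ d ∧ d * d ≤ m then
    let r := pvDivOut d m acc
    pvTrial (d + 1) r.2 r.1
  else (acc, m)
termination_by (m + 1 - d).toNat
decreasing_by exact pv_trial_dec d m acc h.1 h.2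

def factor_prime_power_alt (n : Int) : Int × Int :=
  if n < 2 then (0, 0)  -- raise ValueError (excluded by Pre_)
  else
    let r := pvTrial 2 n []
    let fs := if r.2 > 1 then r.1 ++ [r.2] else r.1
    match fs with
    | [] => (0, 0)  -- factors[0] would raise IndexError; unreachable for n ≥ 2
    | p :: rest =>
      if rest.any (fun f => f != p) then (0, 0)  -- raise ValueError (excluded by Pre_)
      else (p, ((p :: rest).length : Int))

-- ===== PRECONDITION & SPEC =====
-- A raises ValueError on every input that is not a prime power ≥ 2; Pre_ admits exactly the
-- prime powers (p^k, p prime, k ≥ 1), i.e. exactly the inputs on which A returns normally.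
def Pre_factor_prime_power (n : Int) : Prop :=
  2 ≤ n ∧ IsPrimePow n.toNat
instance (n : Int) : Decidable (Pre_factor_prime_power n) := by
  unfold Pre_factor_prime_power; infer_instance
def pvWitness_factor_prime_power : Int := (8)

def Spec_factor_prime_power (n : Int) (out : Int × Int) : Prop := out = factor_prime_power_alt n
instance (n : Int) (out : Int × Int) : Decidable (Spec_factor_prime_power n out) := by unfold Spec_factor_prime_power; infer_instance

-- ===== CLAIM (what is proved, stated in full; the proofs are below) =====
def Claim_equal_factor_prime_power : Prop := ∀ (n : Int), Dom_factor_prime_power n → Pre_factor_prime_power n → Spec_factor_prime_power n (factor_prime_power n)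

-- ===== LEMMAS AND PROOFS =====

-- no integer in [2, p) divides a power of the prime p
theorem no_small_div (p : ℕ) (hp : p.Prime) (k : ℕ) (e : Int)
    (he2 : 2 ≤ e) (hep : e < (p : Int)) : PySem.Int.mod ((p : Int) ^ k) e ≠ 0 := by
  rw [ne_eq, PySem.Int.mod_eq_zero_iff_dvd]
  intro hd
  have he : e = ((e.toNat : ℕ) : Int) := by omega
  rw [he, ← Nat.cast_pow, Int.natCast_dvd_natCast] at hd
  have hne1 : e.toNat ≠ 1 := by omega
  have hq : (e.toNat.minFac).Prime := Nat.minFac_prime hne1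
  have hqe : e.toNat.minFac ∣ e.toNat := Nat.minFac_dvd _
  have hqp : e.toNat.minFac = p :=
    (Nat.prime_dvd_prime_iff_eq hq hp).mp (hq.dvd_of_dvd_pow (hqe.trans hd))
  have : e.toNat.minFac ≤ e.toNat := Nat.minFac_le (by omega)
  omega

theorem pvFindP_eval (p : ℕ) (hp : p.Prime) (k : ℕ) (hk : 1 ≤ k) (d : Int)
    (hd2 : 2 ≤ d) (hdp : d ≤ (p : Int)) :
    2 ≤ pvFindP ((p : Int) ^ k) d ∧ pvFindP ((p : Int) ^ k) d ≤ (p : Int) ∧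
      (2 ≤ k → pvFindP ((p : Int) ^ k) d = (p : Int)) := by
  have hp2 : (2 : Int) ≤ (p : Int) := by exact_mod_cast hp.two_le
  rcases eq_or_lt_of_le hdp with hdeq | hdlt
  · -- d = p : the loop condition fails because p ∣ p^k
    have hmod : PySem.Int.mod ((p : Int) ^ k) d = 0 := by
      rw [PySem.Int.mod_eq_zero_iff_dvd, hdeq]
      exact dvd_pow_self _ (by omega)
    rw [pvFindP]
    simp only [hmod, ne_eq, not_true_eq_false, and_false, dite_false]
    exact ⟨hd2, le_of_eq hdeq, fun _ => hdeq⟩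
  · -- d < p : d does not divide p^k
    have hmod := no_small_div p hp k d hd2 hdlt
    by_cases hsq : d * d ≤ (p : Int) ^ k
    · rw [pvFindP]
      simp only [hsq, hmod, ne_eq, not_false_eq_true, and_self, dite_true]
      exact pvFindP_eval p hp k hk (d + 1) (by omega) (by omega)
    · rw [pvFindP]
      simp only [hsq, false_and, dite_false]
      refine ⟨hd2, hdp, fun hk2 => absurd hsq (not_not_intro ?_)⟩
      have h1 : d * d < (p : Int) * (p : Int) := by nlinarith
      have h2 : (p : Int) * (p : Int) ≤ (p : Int) ^ k := by
        calc (p : Int) * (p : Int) = (p : Int) ^ 2 := by ring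
        _ ≤ (p : Int) ^ k := pow_le_pow_right₀ (by omega) hk2
      omega
termination_by ((p : Int) - d).toNat
decreasing_by omega

theorem pvCountLoop_eval (p : ℕ) (hp2 : 2 ≤ p) :
    ∀ (j : ℕ) (c : Int), pvCountLoop (p : Int) c ((p : Int) ^ j) = (c + (j : Int), 1) := by
  intro j
  induction j with
  | zero =>
    intro c
    rw [pvCountLoop]
    have hm1 : PySem.Int.mod ((1 : Int)) (p : Int) ≠ 0 := by
      rw [ne_eq, PySem.Int.mod_eq_zero_iff_dvd]
      intro h
      have := Int.le_of_dvd (by omega) h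
      omega
    simp [pow_zero, hm1]
  | succ j ih =>
    intro c
    rw [pvCountLoop]
    have hpos : (0 : Int) < (p : Int) ^ (j + 1) := pow_pos (by exact_mod_cast hp2 |>.trans_lt' (by norm_num)) _
    have hmod : PySem.Int.mod ((p : Int) ^ (j + 1)) (p : Int) = 0 := by
      rw [PySem.Int.mod_eq_zero_iff_dvd]; exact dvd_pow_self _ (by omega)
    have hdiv : PySem.Int.floordiv ((p : Int) ^ (j + 1)) (p : Int) = (p : Int) ^ j := by
      rw [PySem.Int.floordiv_eq_ediv_of_pos (by omega)]
      rw [pow_succ, Int.mul_ediv_cancel _ (by omega)]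
    simp only [show (2 : Int) ≤ (p : Int) by exact_mod_cast hp2, hpos, hmod, and_self, dite_true]
    rw [hdiv, ih]
    simp only [Prod.mk.injEq, and_true]
    push_cast
    ring

theorem pvDivOut_pow (p : ℕ) (hp2 : 2 ≤ p) :
    ∀ (j : ℕ) (acc : List Int),
      pvDivOut (p : Int) ((p : Int) ^ j) acc = (acc ++ List.replicate j (p : Int), 1) := by
  intro j
  induction j with
  | zero =>
    intro acc
    rw [pvDivOut]
    have hm1 : PySem.Int.mod ((1 : Int)) (p : Int) ≠ 0 := by
      rw [ne_eq, PySem.Int.mod_eq_zero_iff_dvd]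
      intro h
      have := Int.le_of_dvd (by omega) h
      omega
    simp [pow_zero, hm1]
  | succ j ih =>
    intro acc
    rw [pvDivOut]
    have hpos : (0 : Int) < (p : Int) ^ (j + 1) := pow_pos (by omega) _
    have hmod : PySem.Int.mod ((p : Int) ^ (j + 1)) (p : Int) = 0 := by
      rw [PySem.Int.mod_eq_zero_iff_dvd]; exact dvd_pow_self _ (by omega)
    have hdiv : PySem.Int.floordiv ((p : Int) ^ (j + 1)) (p : Int) = (p : Int) ^ j := by
      rw [PySem.Int.floordiv_eq_ediv_of_pos (by omega)]
      rw [pow_succ, Int.mul_ediv_cancel _ (by omega)]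
    simp only [show (2 : Int) ≤ (p : Int) by exact_mod_cast hp2, hpos, hmod, and_self, dite_true]
    rw [hdiv, ih]
    simp [List.replicate_succ, List.append_assoc]

theorem pvTrial_eval (p : ℕ) (hp : p.Prime) (k : ℕ) (hk : 1 ≤ k) (d : Int) (acc : List Int)
    (hd2 : 2 ≤ d) (hdp : d ≤ (p : Int)) :
    pvTrial d ((p : Int) ^ k) acc =
      if 2 ≤ k then (acc ++ List.replicate k (p : Int), 1) else (acc, (p : Int)) := by
  have hp2 : (2 : Int) ≤ (p : Int) := by exact_mod_cast hp.two_le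
  rcases eq_or_lt_of_le hdp with hdeq | hdlt
  · -- d = p
    by_cases hk2 : 2 ≤ k
    · have hsq : d * d ≤ (p : Int) ^ k := by
        rw [hdeq]
        calc (p : Int) * (p : Int) = (p : Int) ^ 2 := by ring
        _ ≤ (p : Int) ^ k := pow_le_pow_right₀ (by omega) hk2
      rw [pvTrial]
      simp only [hd2, hsq, and_self, dite_true]
      rw [hdeq, pvDivOut_pow p hp.two_le k acc]
      rw [pvTrial]
      have : ¬ (((p : Int) + 1) * ((p : Int) + 1) ≤ 1) := by nlinarith
      simp [this, hk2]
    · have hk1 : k = 1 := by omega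
      subst hk1
      rw [pvTrial]
      have hnot : ¬ (d * d ≤ (p : Int)) := by rw [hdeq]; nlinarith
      simp [pow_one, hnot]
  · -- d < p : d divides nothing
    have hmod := no_small_div p hp k d hd2 hdlt
    by_cases hsq : d * d ≤ (p : Int) ^ k
    · rw [pvTrial]
      simp only [hd2, hsq, and_self, dite_true]
      have hskip : pvDivOut d ((p : Int) ^ k) acc = (acc, (p : Int) ^ k) := by
        rw [pvDivOut]; simp [hmod]
      rw [hskip]
      exact pvTrial_eval p hp k hk (d + 1) acc (by omega) (by omega)
    · rw [pvTrial]
      simp only [hsq, and_false, dite_false]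
      have hk1 : k = 1 := by
        by_contra hne
        have hk2 : 2 ≤ k := by omega
        apply hsq
        have h1 : d * d < (p : Int) * (p : Int) := by nlinarith
        have h2 : (p : Int) * (p : Int) ≤ (p : Int) ^ k := by
          calc (p : Int) * (p : Int) = (p : Int) ^ 2 := by ring
          _ ≤ (p : Int) ^ k := pow_le_pow_right₀ (by omega) hk2
        omega
      subst hk1
      simp [pow_one]
termination_by ((p : Int) - d).toNat
decreasing_by omega

-- ===== VERDICT (by name: the statement is the Claim_ definition above) =====
theorem factor_prime_power_spec : Claim_equal_factor_prime_power := by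
  intro n _ hPre
  obtain ⟨hn2, hpp⟩ := hPre
  obtain ⟨p, k, hp, hkpos, hpk'⟩ := (isPrimePow_nat_iff n.toNat).mp hpp
  have hpk : (p : Int) ^ k = n := by
    have h0 : ((p ^ k : ℕ) : Int) = ((n.toNat : ℕ) : Int) := by rw [hpk']
    push_cast at h0
    omega
  have hp2 : (2 : Int) ≤ (p : Int) := by exact_mod_cast hp.two_le
  have hk1 : 1 ≤ k := hkpos
  -- A's result
  have hA : factor_prime_power n = ((p : Int), (k : Int)) := by
    rw [factor_prime_power]
    simp only [show ¬ n < 2 by omega, if_false]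
    obtain ⟨hq2, hqp, hqk⟩ := pvFindP_eval p hp k hk1 2 le_rfl hp2
    rw [← hpk] at *
    have hpA : (if PySem.Int.mod ((p:Int)^k) (pvFindP ((p:Int)^k) 2) ≠ 0 then (p:Int)^k
        else pvFindP ((p:Int)^k) 2) = (p : Int) := by
      rcases eq_or_lt_of_le hqp with heq | hlt
      · have : PySem.Int.mod ((p:Int)^k) (pvFindP ((p:Int)^k) 2) = 0 := by
          rw [PySem.Int.mod_eq_zero_iff_dvd, heq]
          exact dvd_pow_self _ (by omega)
        rw [heq] at this
        simp [this, heq]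
      · have hk1' : k = 1 := by
          by_contra hne
          exact absurd (hqk (by omega)) (by omega)
        have := no_small_div p hp k _ hq2 hlt
        rw [if_pos this, hk1', pow_one]
    simp only [hpA]
    rw [pvCountLoop_eval p hp.two_le k 0]
    norm_num
  -- B's result
  have hB : factor_prime_power_alt n = ((p : Int), (k : Int)) := by
    rw [factor_prime_power_alt]
    simp only [show ¬ n < 2 by omega, if_false]
    rw [← hpk]
    rw [pvTrial_eval p hp k hk1 2 [] le_rfl hp2]
    by_cases hk2 : 2 ≤ k
    · simp only [hk2, if_true]
      have hrep : List.replicate k (p : Int) = (p : Int) :: List.replicate (k - 1) (p : Int) := by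
        cases k with
        | zero => omega
        | succ j => simp [List.replicate_succ]
      simp only [show ¬ ((1:Int) > 1) by omega, if_false, List.nil_append, hrep]
      have hany : (List.replicate (k - 1) (p : Int)).any (fun f => f != (p : Int)) = false := by
        simp
      simp [hany]
      omega
    · have hk1' : k = 1 := by omega
      subst hk1'
      simp [show (1:Int) < (p:Int) by omega]
  rw [Spec_factor_prime_power, hA, hB]
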